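-- pv_equiv track=rewrite | github.com/Keatwonobe/The_Pirouette_Framework | doclab/experiments/Cross-Domain Validation/helical_fitting/quantum_ansatz.py | apply_cz
-- ===== SOURCE A (Python) =====
-- def apply_cz(state, N, ctrl, targ):
--     new = state.copy()
--     dim = 2**N
--     for idx in range(dim):
--         b_ctrl = (idx >> (N-1-ctrl)) & 1
--         b_targ = (idx >> (N-1-targ)) & 1
--         if b_ctrl==1 and b_targ==1:
--             new[idx] *= -1
--     return new
-- ===== SOURCE B (Python) =====
-- def apply_cz(state, N, ctrl, targ):
--     new = state.copy()
--     dim = 1 << N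
--     hi = 1 << (N - 1 - min(ctrl, targ))   # mask of the more significant of the two bits
--     lo = 1 << (N - 1 - max(ctrl, targ))
--     if ctrl == targ:
--         for base in range(hi, dim, 2 * hi):
--             for idx in range(base, base + hi):
--                 new[idx] = -new[idx]
--     else:
--         for b1 in range(hi, dim, 2 * hi):
--             for b2 in range(b1 + lo, b1 + hi, 2 * lo):
--                 for idx in range(b2, b2 + lo):
--                     new[idx] = -new[idx]
--     return new
-- ===== Notes on version B (the rewrite author's own statement) =====
-- stated objective: alternative
-- what changed: Replaces A's scan over all 2^N indices (testing two bits of each index with shifts) by a direct stride enumeration of exactly the indices whose ctrl and targ bits are both 1, built from bit masks with nested strided ranges (one range per block of the more significant bit, one per sub-block of the less significant bit), negating only those entries; the ctrl==targ case degenerates to one strided range per block.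
import Mathlib
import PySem

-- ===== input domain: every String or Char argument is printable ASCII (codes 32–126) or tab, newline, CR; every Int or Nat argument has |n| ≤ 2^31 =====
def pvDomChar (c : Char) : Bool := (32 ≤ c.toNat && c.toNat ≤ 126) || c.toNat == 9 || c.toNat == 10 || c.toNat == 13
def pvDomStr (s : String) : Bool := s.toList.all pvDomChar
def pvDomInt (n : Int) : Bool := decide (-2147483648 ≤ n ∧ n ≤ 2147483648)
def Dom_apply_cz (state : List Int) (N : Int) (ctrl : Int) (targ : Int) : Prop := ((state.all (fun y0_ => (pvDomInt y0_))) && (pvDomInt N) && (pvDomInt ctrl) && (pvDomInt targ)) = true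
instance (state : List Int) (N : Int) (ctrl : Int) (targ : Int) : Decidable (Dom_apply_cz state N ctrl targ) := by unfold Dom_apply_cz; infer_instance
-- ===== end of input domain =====

-- B replaces A's scan over all 2^N indices (testing two bits of every index) by a direct stride
-- enumeration of exactly the indices whose ctrl and targ bits are both 1, negating only those.
-- A does not mutate its arguments, nor does B.

-- ===== PORT A =====
-- Literal port of A's loop: new[idx] is read with getD (exact under Pre_, where every flipped idx
-- is < state.length) and the shift amounts are nonnegative under Pre_ (ctrl, targ < N), so .toNat is exact.
def apply_cz (state : List Int) (N : Int) (ctrl : Int) (targ : Int) : List Int :=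
  (List.range (2 ^ N.toNat)).foldl (fun new idx =>
    let b_ctrl := (idx >>> (N - 1 - ctrl).toNat) &&& 1
    let b_targ := (idx >>> (N - 1 - targ).toNat) &&& 1
    if b_ctrl = 1 ∧ b_targ = 1 then new.set idx (-(new.getD idx 0)) else new) state

-- ===== PORT B =====
-- Source B's innermost loop 'for idx in range(..): new[idx] = -new[idx]' as a fold; every flipped
-- index is nonnegative (ranges start at positive values), so .toNat is exact.
def czFlip (L : List Int) (xs : List Int) : List Int :=
  L.foldl (fun new idx => new.set idx.toNat (-(new.getD idx.toNat 0))) xs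

-- Python's 1 << k is 2^k; the exponents are nonnegative under Pre_ (ctrl, targ < N), so .toNat is exact.
def apply_cz_alt (state : List Int) (N : Int) (ctrl : Int) (targ : Int) : List Int :=
  let dim : Int := 2 ^ N.toNat
  let hi : Int := 2 ^ (N - 1 - min ctrl targ).toNat
  let lo : Int := 2 ^ (N - 1 - max ctrl targ).toNat
  if ctrl = targ then
    (PySem.List.pyRange hi dim (2 * hi)).foldl
      (fun new base => czFlip (PySem.List.pyRange base (base + hi) 1) new) state
  else
    (PySem.List.pyRange hi dim (2 * hi)).foldl
      (fun new b1 => (PySem.List.pyRange (b1 + lo) (b1 + hi) (2 * lo)).foldl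
        (fun new b2 => czFlip (PySem.List.pyRange b2 (b2 + lo) 1) new) new) state

-- ===== PRECONDITION & SPEC =====
-- Pre_ is exactly the set of inputs on which the Python A returns normally: it excludes only the
-- inputs where A raises (negative N: 2**N is a float, so range() raises TypeError; ctrl ≥ N or
-- targ ≥ N: a negative shift count raises ValueError; a list shorter than 2^N while both ctrl and
-- targ are ≥ 0: the flipped index 2^N-1 is out of range, IndexError; with a negative ctrl or targ
-- nothing flips and any length returns).
def Pre_apply_cz (state : List Int) (N : Int) (ctrl : Int) (targ : Int) : Prop :=
  0 ≤ N ∧ ctrl < N ∧ targ < N ∧ (ctrl < 0 ∨ targ < 0 ∨ 2 ^ N.toNat ≤ state.length)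
instance (state : List Int) (N : Int) (ctrl : Int) (targ : Int) : Decidable (Pre_apply_cz state N ctrl targ) := by unfold Pre_apply_cz; infer_instance

def pvWitness_apply_cz : List Int × Int × Int × Int := ([1, 2, 3, 4], 2, 0, 1)

def Spec_apply_cz (state : List Int) (N : Int) (ctrl : Int) (targ : Int) (out : List Int) : Prop := out = apply_cz_alt state N ctrl targ
instance (state : List Int) (N : Int) (ctrl : Int) (targ : Int) (out : List Int) : Decidable (Spec_apply_cz state N ctrl targ out) := by unfold Spec_apply_cz; infer_instance

-- ===== CLAIM (what is proved, stated in full; the proofs are below) =====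
def Claim_equal_apply_cz : Prop := ∀ (state : List Int) (N : Int) (ctrl : Int) (targ : Int), Dom_apply_cz state N ctrl targ → Pre_apply_cz state N ctrl targ → Spec_apply_cz state N ctrl targ (apply_cz state N ctrl targ)

-- ===== LEMMAS AND PROOFS =====

-- ---------- A's loop as a named fold (definitionally equal to apply_cz's body) ----------
def czFold (p : Nat → Prop) [DecidablePred p] (d : Nat) (xs : List Int) : List Int :=
  (List.range d).foldl (fun new idx => if p idx then new.set idx (-(new.getD idx 0)) else new) xs

theorem czFold_succ (p : Nat → Prop) [DecidablePred p] (d : Nat) (xs : List Int) :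
    czFold p (d+1) xs =
      if p d then (czFold p d xs).set d (-((czFold p d xs).getD d 0)) else czFold p d xs := by
  simp [czFold, List.range_succ]

theorem czFold_length (p : Nat → Prop) [DecidablePred p] (d : Nat) (xs : List Int) :
    (czFold p d xs).length = xs.length := by
  induction d with
  | zero => simp [czFold]
  | succ d ih => rw [czFold_succ]; split <;> simp [ih]

theorem czFold_get? (p : Nat → Prop) [DecidablePred p] (d : Nat) (xs : List Int)
    (hd : d ≤ xs.length) : ∀ (i : Nat), i < xs.length →
    (czFold p d xs)[i]? = some (if i < d ∧ p i then -(xs.getD i 0) else xs.getD i 0) := by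
  induction d with
  | zero =>
    intro i hi
    simp [czFold, List.getElem?_eq_getElem hi]
  | succ d ih =>
    intro i hi
    have hd' : d ≤ xs.length := by omega
    have hdlt : d < (czFold p d xs).length := by rw [czFold_length]; omega
    have hgd : (czFold p d xs).getD d 0 = xs.getD d 0 := by
      have h := ih hd' d (by omega)
      rw [if_neg (by rintro ⟨h1, _⟩; omega)] at h
      rw [List.getElem?_eq_getElem hdlt] at h
      rw [List.getD_eq_getElem _ 0 hdlt, Option.some_inj.mp h]
    rw [czFold_succ]
    by_cases hpd : p d
    · rw [if_pos hpd]
      by_cases hid : i = d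
      · subst hid
        rw [List.getElem?_set_self hdlt, hgd, if_pos ⟨by omega, hpd⟩]
      · rw [List.getElem?_set_ne (by omega), ih hd' i hi]
        congr 1
        refine if_congr ⟨fun ⟨h1, h2⟩ => ⟨by omega, h2⟩, fun ⟨h1, h2⟩ => ⟨by omega, h2⟩⟩ rfl rfl
    · rw [if_neg hpd, ih hd' i hi]
      congr 1
      refine if_congr ⟨fun ⟨h1, h2⟩ => ⟨by omega, h2⟩, fun ⟨h1, h2⟩ => ?_⟩ rfl rfl
      refine ⟨?_, h2⟩
      rcases Nat.lt_succ_iff_lt_or_eq.mp h1 with h | h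
      · exact h
      · exact absurd (h ▸ h2) hpd

theorem czFold_id (p : Nat → Prop) [DecidablePred p] (d : Nat) (xs : List Int)
    (h : ∀ i, i < d → ¬ p i) : czFold p d xs = xs := by
  induction d with
  | zero => simp [czFold]
  | succ d ih =>
    rw [czFold_succ, if_neg (h d (by omega)), ih (fun i hi => h i (by omega))]

theorem shiftHigh_zero (i m k : Nat) (hi : i < 2 ^ m) (hk : m ≤ k) : i >>> k = 0 := by
  rw [Nat.shiftRight_eq_div_pow]
  exact Nat.div_eq_of_lt (lt_of_lt_of_le hi (Nat.pow_le_pow_right (by omega) hk))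

theorem shift_and_eq (j s : Nat) : ((j >>> s) &&& 1 = 1) ↔ (j / 2^s) % 2 = 1 := by
  rw [Nat.shiftRight_eq_div_pow, Nat.and_one_is_mod]

-- ---------- czFlip: pointwise description of a flip list ----------
theorem czFlip_append (L1 L2 : List Int) (xs : List Int) :
    czFlip (L1 ++ L2) xs = czFlip L2 (czFlip L1 xs) := by
  simp [czFlip, List.foldl_append]

theorem czFlip_length (L : List Int) (xs : List Int) : (czFlip L xs).length = xs.length := by
  induction L generalizing xs with
  | nil => simp [czFlip]
  | cons a L ih =>
    show (czFlip L _).length = _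
    rw [ih]
    simp

theorem czFlip_get? (L : List Int) (xs : List Int)
    (hb : ∀ x ∈ L, 0 ≤ x ∧ x.toNat < xs.length) (hnd : L.Nodup) :
    ∀ (i : Nat), i < xs.length →
    (czFlip L xs)[i]? = some (if (i:Int) ∈ L then -(xs.getD i 0) else xs.getD i 0) := by
  induction L generalizing xs with
  | nil =>
    intro i hi
    simp [czFlip, List.getElem?_eq_getElem hi]
  | cons a L ih =>
    intro i hi
    obtain ⟨ha0, hal⟩ := hb a List.mem_cons_self
    rw [List.nodup_cons] at hnd
    have hstep : czFlip (a :: L) xs = czFlip L (xs.set a.toNat (-(xs.getD a.toNat 0))) := rfl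
    have hlen' : (xs.set a.toNat (-(xs.getD a.toNat 0))).length = xs.length := by simp
    rw [hstep, ih _ (fun x hx => by rw [hlen']; exact hb x (List.mem_cons_of_mem a hx)) hnd.2 i
      (by rw [hlen']; exact hi)]
    by_cases hia : (i:Int) = a
    · have hian : i = a.toNat := by omega
      rw [if_neg (show (i:Int) ∉ L by rw [hia]; exact hnd.1),
        if_pos (show (i:Int) ∈ a :: L by rw [hia]; exact List.mem_cons_self)]
      rw [hian, List.getD_eq_getElem _ 0 (show a.toNat < (xs.set a.toNat (-(xs.getD a.toNat 0))).length by rw [hlen']; exact hal),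
        List.getElem_set_self (by simpa using hal)]
    · have hian : i ≠ a.toNat := by omega
      have hgd : (xs.set a.toNat (-(xs.getD a.toNat 0))).getD i 0 = xs.getD i 0 := by
        rw [List.getD_eq_getElem _ 0 (show i < (xs.set a.toNat (-(xs.getD a.toNat 0))).length by rw [hlen']; exact hi),
          List.getD_eq_getElem _ 0 hi, List.getElem_set_ne (by omega)]
      rw [hgd]
      congr 1
      refine if_congr ⟨fun h => List.mem_cons_of_mem a h, fun h => ?_⟩ rfl rfl
      rcases List.mem_cons.mp h with h | h
      · exact absurd h hia
      · exact h

theorem foldl_czFlip_flatMap (l : List Int) (f : Int → List Int) (xs : List Int) :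
    l.foldl (fun acc b => czFlip (f b) acc) xs = czFlip (l.flatMap f) xs := by
  induction l generalizing xs with
  | nil => simp [czFlip]
  | cons a l ih =>
    rw [List.flatMap_cons, czFlip_append, List.foldl_cons, ih]

-- ---------- digit decompositions ----------
theorem digit2_iff (nn sh sl : Nat) (hsl : sl < sh) (hsh : sh < nn) (j : Nat) :
    (∃ m, m < 2^(nn-sh-1) ∧ ∃ r, r < 2^(sh-sl-1) ∧ ∃ u, u < 2^sl ∧
      j = 2^sh + 2^(sh+1)*m + (2^sl + 2^(sl+1)*r) + u)
    ↔ (j < 2^nn ∧ j / 2^sh % 2 = 1 ∧ j / 2^sl % 2 = 1) := by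
  have hsh1 : (2:Nat)^(sh+1) = 2^(sl+1) * (2^(sh-sl-1) * 2) := by
    rw [← pow_succ, ← pow_add]; congr 1; omega
  have hshp : (2:Nat)^sh = 2^sl * (2^(sh-sl-1) * 2) := by
    rw [← pow_succ, ← pow_add]; congr 1; omega
  constructor
  · rintro ⟨m, hm, r, hr, u, hu, rfl⟩
    have htail : 2^sl + 2^(sl+1)*r + u < 2^sh := by
      calc 2^sl + 2^(sl+1)*r + u < 2^sl + 2^(sl+1)*r + 2^sl := by omega
        _ = 2^(sl+1) * (r + 1) := by ring
        _ ≤ 2^(sl+1) * 2^(sh-sl-1) := Nat.mul_le_mul_left _ (by omega)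
        _ = 2^sh := by rw [← pow_add]; congr 1; omega
    refine ⟨?_, ?_, ?_⟩
    · calc 2^sh + 2^(sh+1)*m + (2^sl + 2^(sl+1)*r) + u
          < 2^sh + 2^(sh+1)*m + 2^sh := by omega
        _ = 2^(sh+1) * (m + 1) := by rw [pow_succ]; ring
        _ ≤ 2^(sh+1) * 2^(nn-sh-1) := Nat.mul_le_mul_left _ (by omega)
        _ = 2^nn := by rw [← pow_add]; congr 1; omega
    · have h : 2^sh + 2^(sh+1)*m + (2^sl + 2^(sl+1)*r) + u
           = 2^sh * (2*m + 1) + (2^sl + 2^(sl+1)*r + u) := by rw [pow_succ]; ring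
      rw [h, Nat.mul_add_div (Nat.two_pow_pos sh), Nat.div_eq_of_lt htail]
      omega
    · have h : 2^sh + 2^(sh+1)*m + (2^sl + 2^(sl+1)*r) + u
           = 2^sl * (2^(sh-sl-1)*2*m*2 + 2^(sh-sl-1)*2 + 2*r + 1) + u := by
        rw [hsh1, hshp]; ring
      rw [h, Nat.mul_add_div (Nat.two_pow_pos sl), Nat.div_eq_of_lt hu]
      omega
  · rintro ⟨hj, hbh, hbl⟩
    have hpl : 0 < (2:Nat)^sl := Nat.two_pow_pos sl
    have hpr : 0 < (2:Nat)^(sh-sl-1) := Nat.two_pow_pos _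
    have hju : j = 2^sl * (j / 2^sl) + j % 2^sl := (Nat.div_add_mod j (2^sl)).symm
    have hq : j / 2^sl = 2 * (j / 2^(sl+1)) + 1 := by
      have h1 : j / 2^sl / 2 = j / 2^(sl+1) := by
        rw [Nat.div_div_eq_div_mul, ← pow_succ]
      have := Nat.div_add_mod (j / 2^sl) 2
      omega
    have h1 : j / 2^(sl+1) / 2^(sh-sl-1) = j / 2^sh := by
      rw [Nat.div_div_eq_div_mul, ← pow_add]
      congr 2
      omega
    have hq1 : j / 2^(sl+1) = 2^(sh-sl-1) * (j / 2^sh) + (j / 2^(sl+1)) % 2^(sh-sl-1) := by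
      rw [← h1]
      exact (Nat.div_add_mod _ _).symm
    have hm' : j / 2^sh = 2 * (j / 2^(sh+1)) + 1 := by
      have h2 : j / 2^sh / 2 = j / 2^(sh+1) := by
        rw [Nat.div_div_eq_div_mul, ← pow_succ]
      have := Nat.div_add_mod (j / 2^sh) 2
      omega
    refine ⟨j / 2^(sh+1), ?_, (j / 2^(sl+1)) % 2^(sh-sl-1), Nat.mod_lt _ hpr,
      j % 2^sl, Nat.mod_lt _ hpl, ?_⟩
    · rw [Nat.div_lt_iff_lt_mul (Nat.two_pow_pos (sh+1)), ← pow_add]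
      calc j < 2^nn := hj
        _ ≤ 2^(nn - sh - 1 + (sh+1)) := Nat.pow_le_pow_right (by omega) (by omega)
    · conv_lhs => rw [hju, hq, hq1, hm']
      rw [hshp, hsh1]
      ring

theorem digit1_iff (nn sh : Nat) (hsh : sh < nn) (j : Nat) :
    (∃ m, m < 2^(nn-sh-1) ∧ ∃ u, u < 2^sh ∧ j = 2^sh + 2^(sh+1)*m + u)
    ↔ (j < 2^nn ∧ j / 2^sh % 2 = 1) := by
  constructor
  · rintro ⟨m, hm, u, hu, rfl⟩
    constructor
    · calc 2^sh + 2^(sh+1)*m + u < 2^sh + 2^(sh+1)*m + 2^sh := by omega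
        _ = 2^(sh+1) * (m + 1) := by rw [pow_succ]; ring
        _ ≤ 2^(sh+1) * 2^(nn-sh-1) := Nat.mul_le_mul_left _ (by omega)
        _ = 2^nn := by rw [← pow_add]; congr 1; omega
    · have h : 2^sh + 2^(sh+1)*m + u = 2^sh * (2*m + 1) + u := by rw [pow_succ]; ring
      rw [h, Nat.mul_add_div (Nat.two_pow_pos sh), Nat.div_eq_of_lt hu]
      omega
  · rintro ⟨hj, hbh⟩
    have hph : 0 < (2:Nat)^sh := Nat.two_pow_pos sh
    have hju : j = 2^sh * (j / 2^sh) + j % 2^sh := (Nat.div_add_mod j (2^sh)).symm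
    have hm' : j / 2^sh = 2 * (j / 2^(sh+1)) + 1 := by
      have h1 : j / 2^sh / 2 = j / 2^(sh+1) := by
        rw [Nat.div_div_eq_div_mul, ← pow_succ]
      have := Nat.div_add_mod (j / 2^sh) 2
      omega
    refine ⟨j / 2^(sh+1), ?_, j % 2^sh, Nat.mod_lt _ hph, ?_⟩
    · rw [Nat.div_lt_iff_lt_mul (Nat.two_pow_pos (sh+1)), ← pow_add]
      calc j < 2^nn := hj
        _ ≤ 2^(nn - sh - 1 + (sh+1)) := Nat.pow_le_pow_right (by omega) (by omega)
    · conv_lhs => rw [hju, hm']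
      rw [pow_succ]
      ring

-- ---------- pyRange with power bounds and step as an explicit map ----------
theorem pyRange_pow_map (c : Int) (a b : Nat) (hab : a < b) :
    PySem.List.pyRange (c + 2^a) (c + 2^b) (2^(a+1)) =
      (List.range (2^(b-a-1))).map (fun (k : Nat) => c + 2^a + 2^(a+1) * (k:Int)) := by
  rw [PySem.List.pyRange_of_pos _ _ (by positivity)]
  have hlt : c + (2:Int)^a < c + 2^b := by
    have : (2:Int)^a < 2^b := by
      apply pow_lt_pow_right₀ (by norm_num) hab
    omega
  rw [if_pos hlt]
  have hnum : c + (2:Int)^b - (c + 2^a) + 2^(a+1) - 1 = (2^a - 1) + 2^(a+1) * 2^(b-a-1) := by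
    have h1 : (2:Int)^b = 2^(a+1) * 2^(b-a-1) := by rw [← pow_add]; congr 1; omega
    rw [h1]; ring
  have htn : ((2:Int)^(b-a-1)).toNat = 2^(b-a-1) := by
    rw [show ((2:Int)^(b-a-1)) = ((2^(b-a-1) : Nat) : Int) by push_cast; ring,
      Int.toNat_natCast]
  rw [hnum, Int.add_mul_ediv_left _ _ (by positivity : (0:Int) < 2^(a+1)).ne',
    Int.ediv_eq_zero_of_lt (by
      have h2 : (0:Int) < 2^a := by positivity
      omega) (by
      have h3 : (2:Int)^(a+1) = 2^a * 2 := by rw [pow_succ]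
      have h2 : (0:Int) < 2^a := by positivity
      omega), zero_add, htn]

-- ---------- strictly sorted flatMap (for Nodup) ----------
theorem flatMap_sorted {α : Type} (l : List α) (f : α → List Int) (lb ub : α → Int)
    (hl : l.Pairwise (fun a b => ub a ≤ lb b))
    (hf : ∀ x ∈ l, (f x).Pairwise (· < ·))
    (hin : ∀ x ∈ l, ∀ y ∈ f x, lb x ≤ y ∧ y < ub x) :
    (l.flatMap f).Pairwise (· < ·) := by
  induction l with
  | nil => simp
  | cons a l ih =>
    rw [List.flatMap_cons, List.pairwise_append]
    rw [List.pairwise_cons] at hl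
    refine ⟨hf a List.mem_cons_self, ih hl.2 (fun x hx => hf x (List.mem_cons_of_mem a hx))
      (fun x hx y hy => hin x (List.mem_cons_of_mem a hx) y hy), ?_⟩
    intro y hy z hz
    obtain ⟨x, hx, hzx⟩ := List.mem_flatMap.mp hz
    calc y < ub a := (hin a List.mem_cons_self y hy).2
      _ ≤ lb x := hl.1 x hx
      _ ≤ z := (hin x (List.mem_cons_of_mem a hx) z hzx).1

-- ---------- the stride index lists of B ----------
def strideL2 (nn sh sl : Nat) : List Int :=
  (PySem.List.pyRange (2^sh) (2^nn) (2 * 2^sh)).flatMap (fun b1 =>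
    (PySem.List.pyRange (b1 + 2^sl) (b1 + 2^sh) (2 * 2^sl)).flatMap (fun b2 =>
      PySem.List.pyRange b2 (b2 + 2^sl) 1))

def strideL1 (nn sh : Nat) : List Int :=
  (PySem.List.pyRange (2^sh) (2^nn) (2 * 2^sh)).flatMap (fun b1 =>
    PySem.List.pyRange b1 (b1 + 2^sh) 1)

theorem two_mul_pow (e : Nat) : (2:Int) * 2^e = 2^(e+1) := (pow_succ' 2 e).symm

theorem strideL2_eq (nn sh sl : Nat) (hsl : sl < sh) (hsh : sh < nn) :
    strideL2 nn sh sl = (List.range (2^(nn-sh-1))).flatMap (fun (k1 : Nat) =>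
      (List.range (2^(sh-sl-1))).flatMap (fun (k2 : Nat) =>
        PySem.List.pyRange (2^sh + 2^(sh+1)*(k1:Int) + 2^sl + 2^(sl+1)*(k2:Int))
          (2^sh + 2^(sh+1)*(k1:Int) + 2^sl + 2^(sl+1)*(k2:Int) + 2^sl) 1)) := by
  unfold strideL2
  rw [two_mul_pow sh, two_mul_pow sl]
  have houter : PySem.List.pyRange (2^sh) (2^nn) (2^(sh+1)) =
      (List.range (2^(nn-sh-1))).map (fun (k : Nat) => (2:Int)^sh + 2^(sh+1) * (k:Int)) := by
    have h := pyRange_pow_map 0 sh nn (by omega)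
    simpa using h
  rw [houter, List.flatMap_map]
  refine congrArg (List.range (2^(nn-sh-1))).flatMap (funext fun k1 => ?_)
  show (PySem.List.pyRange ((2:Int)^sh + 2^(sh+1)*(k1:Int) + 2^sl)
      ((2:Int)^sh + 2^(sh+1)*(k1:Int) + 2^sh) (2^(sl+1))).flatMap
      (fun b2 => PySem.List.pyRange b2 (b2 + 2^sl) 1) = _
  rw [pyRange_pow_map ((2:Int)^sh + 2^(sh+1)*(k1:Int)) sl sh hsl, List.flatMap_map]

theorem strideL1_eq (nn sh : Nat) (hsh : sh < nn) :
    strideL1 nn sh = (List.range (2^(nn-sh-1))).flatMap (fun (k1 : Nat) =>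
      PySem.List.pyRange (2^sh + 2^(sh+1)*(k1:Int)) (2^sh + 2^(sh+1)*(k1:Int) + 2^sh) 1) := by
  unfold strideL1
  rw [two_mul_pow sh]
  have houter : PySem.List.pyRange (2^sh) (2^nn) (2^(sh+1)) =
      (List.range (2^(nn-sh-1))).map (fun (k : Nat) => (2:Int)^sh + 2^(sh+1) * (k:Int)) := by
    have h := pyRange_pow_map 0 sh nn (by omega)
    simpa using h
  rw [houter, List.flatMap_map]

theorem mem_strideL2 (nn sh sl : Nat) (hsl : sl < sh) (hsh : sh < nn) (j : Nat) :
    ((j:Int) ∈ strideL2 nn sh sl) ↔ (j < 2^nn ∧ j / 2^sh % 2 = 1 ∧ j / 2^sl % 2 = 1) := by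
  rw [strideL2_eq nn sh sl hsl hsh, ← digit2_iff nn sh sl hsl hsh j]
  simp only [List.mem_flatMap, List.mem_range, PySem.List.mem_pyRange_one]
  constructor
  · rintro ⟨k1, hk1, k2, hk2, hge, hlt⟩
    have hcast1 : ((2^sh + 2^(sh+1)*k1 + (2^sl + 2^(sl+1)*k2) : Nat) : Int)
        = 2^sh + 2^(sh+1)*(k1:Int) + 2^sl + 2^(sl+1)*(k2:Int) := by push_cast; ring
    have hcast2 : ((2^sh + 2^(sh+1)*k1 + (2^sl + 2^(sl+1)*k2) + 2^sl : Nat) : Int)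
        = 2^sh + 2^(sh+1)*(k1:Int) + 2^sl + 2^(sl+1)*(k2:Int) + 2^sl := by push_cast; ring
    rw [← hcast1] at hge
    rw [← hcast2] at hlt
    have h1 : (2^sh + 2^(sh+1)*k1 + (2^sl + 2^(sl+1)*k2) : Nat) ≤ j := by exact_mod_cast hge
    have h2 : j < 2^sh + 2^(sh+1)*k1 + (2^sl + 2^(sl+1)*k2) + 2^sl := by exact_mod_cast hlt
    exact ⟨k1, hk1, k2, hk2, j - (2^sh + 2^(sh+1)*k1 + (2^sl + 2^(sl+1)*k2)), by omega, by omega⟩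
  · rintro ⟨m, hm, r, hr, u, hu, rfl⟩
    have hc : ((2^sh + 2^(sh+1)*m + (2^sl + 2^(sl+1)*r) : Nat) : Int)
        = 2^sh + 2^(sh+1)*(m:Int) + 2^sl + 2^(sl+1)*(r:Int) := by push_cast; ring
    refine ⟨m, hm, r, hr, ?_, ?_⟩
    · rw [← hc]
      exact_mod_cast (by omega : (2^sh + 2^(sh+1)*m + (2^sl + 2^(sl+1)*r) : Nat)
        ≤ 2^sh + 2^(sh+1)*m + (2^sl + 2^(sl+1)*r) + u)
    · have hc2 : ((2^sh + 2^(sh+1)*m + (2^sl + 2^(sl+1)*r) + 2^sl : Nat) : Int)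
          = 2^sh + 2^(sh+1)*(m:Int) + 2^sl + 2^(sl+1)*(r:Int) + 2^sl := by push_cast; ring
      rw [← hc2]
      exact_mod_cast (by omega : (2^sh + 2^(sh+1)*m + (2^sl + 2^(sl+1)*r) + u : Nat)
        < 2^sh + 2^(sh+1)*m + (2^sl + 2^(sl+1)*r) + 2^sl)

theorem mem_strideL1 (nn sh : Nat) (hsh : sh < nn) (j : Nat) :
    ((j:Int) ∈ strideL1 nn sh) ↔ (j < 2^nn ∧ j / 2^sh % 2 = 1) := by
  rw [strideL1_eq nn sh hsh, ← digit1_iff nn sh hsh j]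
  simp only [List.mem_flatMap, List.mem_range, PySem.List.mem_pyRange_one]
  constructor
  · rintro ⟨k1, hk1, hge, hlt⟩
    have hcast1 : ((2^sh + 2^(sh+1)*k1 : Nat) : Int) = 2^sh + 2^(sh+1)*(k1:Int) := by
      push_cast; ring
    have hcast2 : ((2^sh + 2^(sh+1)*k1 + 2^sh : Nat) : Int)
        = 2^sh + 2^(sh+1)*(k1:Int) + 2^sh := by push_cast; ring
    rw [← hcast1] at hge
    rw [← hcast2] at hlt
    have h1 : (2^sh + 2^(sh+1)*k1 : Nat) ≤ j := by exact_mod_cast hge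
    have h2 : j < 2^sh + 2^(sh+1)*k1 + 2^sh := by exact_mod_cast hlt
    exact ⟨k1, hk1, j - (2^sh + 2^(sh+1)*k1), by omega, by omega⟩
  · rintro ⟨m, hm, u, hu, rfl⟩
    have hc : ((2^sh + 2^(sh+1)*m : Nat) : Int) = 2^sh + 2^(sh+1)*(m:Int) := by push_cast; ring
    refine ⟨m, hm, ?_, ?_⟩
    · rw [← hc]
      exact_mod_cast (by omega : (2^sh + 2^(sh+1)*m : Nat) ≤ 2^sh + 2^(sh+1)*m + u)
    · have hc2 : ((2^sh + 2^(sh+1)*m + 2^sh : Nat) : Int)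
          = 2^sh + 2^(sh+1)*(m:Int) + 2^sh := by push_cast; ring
      rw [← hc2]
      exact_mod_cast (by omega : (2^sh + 2^(sh+1)*m + u : Nat) < 2^sh + 2^(sh+1)*m + 2^sh)

theorem bounds_strideL2 (nn sh sl : Nat) (hsl : sl < sh) (hsh : sh < nn) :
    ∀ x ∈ strideL2 nn sh sl, 0 ≤ x ∧ x < 2^nn := by
  rw [strideL2_eq nn sh sl hsl hsh]
  intro x hx
  simp only [List.mem_flatMap, List.mem_range, PySem.List.mem_pyRange_one] at hx
  obtain ⟨k1, hk1, k2, hk2, hge, hlt⟩ := hx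
  have e1 : (2:Int)^(sl+1) * (2^(sh-sl-1):Int) = 2^sh := by rw [← pow_add]; congr 1; omega
  have e2 : (2:Int)^(sh+1) * (2^(nn-sh-1):Int) = 2^nn := by rw [← pow_add]; congr 1; omega
  have e3 : (2:Int)^(sl+1) = 2^sl + 2^sl := by rw [pow_succ]; ring
  have e4 : (2:Int)^(sh+1) = 2^sh + 2^sh := by rw [pow_succ]; ring
  have t1 : (0:Int) ≤ 2^(sh+1)*(k1:Int) := by positivity
  have t2 : (0:Int) ≤ 2^(sl+1)*(k2:Int) := by positivity
  have t3 : (2:Int)^(sl+1)*(k2:Int) + 2^(sl+1) ≤ 2^(sl+1)*(2^(sh-sl-1):Int) := by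
    calc (2:Int)^(sl+1)*(k2:Int) + 2^(sl+1) = 2^(sl+1)*((k2:Int)+1) := by ring
      _ ≤ 2^(sl+1)*(2^(sh-sl-1):Int) := by
          apply mul_le_mul_of_nonneg_left _ (by positivity)
          exact_mod_cast hk2
  have t4 : (2:Int)^(sh+1)*(k1:Int) + 2^(sh+1) ≤ 2^(sh+1)*(2^(nn-sh-1):Int) := by
    calc (2:Int)^(sh+1)*(k1:Int) + 2^(sh+1) = 2^(sh+1)*((k1:Int)+1) := by ring
      _ ≤ 2^(sh+1)*(2^(nn-sh-1):Int) := by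
          apply mul_le_mul_of_nonneg_left _ (by positivity)
          exact_mod_cast hk1
  have p1 : (0:Int) < 2^sh := by positivity
  have p2 : (0:Int) < 2^sl := by positivity
  omega

theorem bounds_strideL1 (nn sh : Nat) (hsh : sh < nn) :
    ∀ x ∈ strideL1 nn sh, 0 ≤ x ∧ x < 2^nn := by
  rw [strideL1_eq nn sh hsh]
  intro x hx
  simp only [List.mem_flatMap, List.mem_range, PySem.List.mem_pyRange_one] at hx
  obtain ⟨k1, hk1, hge, hlt⟩ := hx
  have e2 : (2:Int)^(sh+1) * (2^(nn-sh-1):Int) = 2^nn := by rw [← pow_add]; congr 1; omega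
  have e4 : (2:Int)^(sh+1) = 2^sh + 2^sh := by rw [pow_succ]; ring
  have t1 : (0:Int) ≤ 2^(sh+1)*(k1:Int) := by positivity
  have t4 : (2:Int)^(sh+1)*(k1:Int) + 2^(sh+1) ≤ 2^(sh+1)*(2^(nn-sh-1):Int) := by
    calc (2:Int)^(sh+1)*(k1:Int) + 2^(sh+1) = 2^(sh+1)*((k1:Int)+1) := by ring
      _ ≤ 2^(sh+1)*(2^(nn-sh-1):Int) := by
          apply mul_le_mul_of_nonneg_left _ (by positivity)
          exact_mod_cast hk1
  have p1 : (0:Int) < 2^sh := by positivity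
  omega

theorem sorted_strideL1 (nn sh : Nat) (hsh : sh < nn) :
    (strideL1 nn sh).Pairwise (· < ·) := by
  rw [strideL1_eq nn sh hsh]
  apply flatMap_sorted _ _ (fun (k1 : Nat) => (2:Int)^sh + 2^(sh+1)*(k1:Int))
    (fun (k1 : Nat) => (2:Int)^sh + 2^(sh+1)*(k1:Int) + 2^(sh+1))
  · refine List.pairwise_lt_range.imp ?_
    intro a b hab
    have h : (2:Int)^(sh+1)*(a:Int) + 2^(sh+1) ≤ 2^(sh+1)*(b:Int) := by
      calc (2:Int)^(sh+1)*(a:Int) + 2^(sh+1) = 2^(sh+1)*((a:Int)+1) := by ring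
        _ ≤ 2^(sh+1)*(b:Int) := by
            apply mul_le_mul_of_nonneg_left _ (by positivity)
            exact_mod_cast hab
    omega
  · intro x _
    exact PySem.List.pairwise_lt_pyRange_one _ _
  · intro x _ y hy
    rw [PySem.List.mem_pyRange_one] at hy
    have e4 : (2:Int)^(sh+1) = 2^sh + 2^sh := by rw [pow_succ]; ring
    omega

theorem sorted_strideL2 (nn sh sl : Nat) (hsl : sl < sh) (hsh : sh < nn) :
    (strideL2 nn sh sl).Pairwise (· < ·) := by
  rw [strideL2_eq nn sh sl hsl hsh]
  apply flatMap_sorted _ _ (fun (k1 : Nat) => (2:Int)^sh + 2^(sh+1)*(k1:Int))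
    (fun (k1 : Nat) => (2:Int)^sh + 2^(sh+1)*(k1:Int) + 2^(sh+1))
  · refine List.pairwise_lt_range.imp ?_
    intro a b hab
    have h : (2:Int)^(sh+1)*(a:Int) + 2^(sh+1) ≤ 2^(sh+1)*(b:Int) := by
      calc (2:Int)^(sh+1)*(a:Int) + 2^(sh+1) = 2^(sh+1)*((a:Int)+1) := by ring
        _ ≤ 2^(sh+1)*(b:Int) := by
            apply mul_le_mul_of_nonneg_left _ (by positivity)
            exact_mod_cast hab
    omega
  · intro k1 _
    apply flatMap_sorted _ _
      (fun (k2 : Nat) => (2:Int)^sh + 2^(sh+1)*(k1:Int) + 2^sl + 2^(sl+1)*(k2:Int))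
      (fun (k2 : Nat) => (2:Int)^sh + 2^(sh+1)*(k1:Int) + 2^sl + 2^(sl+1)*(k2:Int) + 2^(sl+1))
    · refine List.pairwise_lt_range.imp ?_
      intro a b hab
      have h : (2:Int)^(sl+1)*(a:Int) + 2^(sl+1) ≤ 2^(sl+1)*(b:Int) := by
        calc (2:Int)^(sl+1)*(a:Int) + 2^(sl+1) = 2^(sl+1)*((a:Int)+1) := by ring
          _ ≤ 2^(sl+1)*(b:Int) := by
              apply mul_le_mul_of_nonneg_left _ (by positivity)
              exact_mod_cast hab
      omega
    · intro x _
      exact PySem.List.pairwise_lt_pyRange_one _ _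
    · intro x _ y hy
      rw [PySem.List.mem_pyRange_one] at hy
      have e3 : (2:Int)^(sl+1) = 2^sl + 2^sl := by rw [pow_succ]; ring
      have p2 : (0:Int) < 2^sl := by positivity
      omega
  · intro k1 _ y hy
    simp only [List.mem_flatMap, List.mem_range, PySem.List.mem_pyRange_one] at hy
    obtain ⟨k2, hk2, hge, hlt⟩ := hy
    have e1 : (2:Int)^(sl+1) * (2^(sh-sl-1):Int) = 2^sh := by rw [← pow_add]; congr 1; omega
    have e3 : (2:Int)^(sl+1) = 2^sl + 2^sl := by rw [pow_succ]; ring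
    have e4 : (2:Int)^(sh+1) = 2^sh + 2^sh := by rw [pow_succ]; ring
    have t2 : (0:Int) ≤ 2^(sl+1)*(k2:Int) := by positivity
    have t3 : (2:Int)^(sl+1)*(k2:Int) + 2^(sl+1) ≤ 2^(sl+1)*(2^(sh-sl-1):Int) := by
      calc (2:Int)^(sl+1)*(k2:Int) + 2^(sl+1) = 2^(sl+1)*((k2:Int)+1) := by ring
        _ ≤ 2^(sl+1)*(2^(sh-sl-1):Int) := by
            apply mul_le_mul_of_nonneg_left _ (by positivity)
            exact_mod_cast hk2
    have p2 : (0:Int) < 2^sl := by positivity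
    omega

theorem czFold_congr (p q : Nat → Prop) [DecidablePred p] [DecidablePred q]
    (h : ∀ i, p i ↔ q i) (d : Nat) (xs : List Int) : czFold p d xs = czFold q d xs := by
  induction d with
  | zero => simp [czFold]
  | succ d ih => rw [czFold_succ, czFold_succ, ih, if_congr (h d) rfl rfl]

theorem pyRange_pow_nil (a b : Nat) (hab : b ≤ a) :
    PySem.List.pyRange ((2:Int)^a) (2^b) (2*2^a) = [] := by
  rw [PySem.List.pyRange_of_pos _ _ (by positivity), if_neg (by
    have h := pow_le_pow_right₀ (by norm_num : (1:Int) ≤ 2) hab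
    omega)]
  simp

theorem czMain2 (state : List Int) (nn sh sl : Nat) (hsl : sl < sh) (hsh : sh < nn)
    (hlen : 2^nn ≤ state.length) :
    czFold (fun j => (j >>> sh) &&& 1 = 1 ∧ (j >>> sl) &&& 1 = 1) (2^nn) state
      = czFlip (strideL2 nn sh sl) state := by
  have hnd : (strideL2 nn sh sl).Nodup :=
    (sorted_strideL2 nn sh sl hsl hsh).imp (fun h => ne_of_lt h)
  have hb : ∀ x ∈ strideL2 nn sh sl, 0 ≤ x ∧ x.toNat < state.length := by
    intro x hx
    obtain ⟨h0, hlt⟩ := bounds_strideL2 nn sh sl hsl hsh x hx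
    have hc : ((2^nn : Nat) : Int) = 2^nn := by push_cast; ring
    refine ⟨h0, ?_⟩
    rw [← hc] at hlt
    omega
  apply List.ext_getElem?
  intro i
  by_cases hi : i < state.length
  · rw [czFold_get? _ _ _ (by omega) i hi, czFlip_get? _ _ hb hnd i hi]
    congr 1
    refine if_congr ?_ rfl rfl
    rw [mem_strideL2 nn sh sl hsl hsh i]
    simp only [shift_and_eq]
  · rw [List.getElem?_eq_none_iff.mpr (by rw [czFold_length]; omega),
      List.getElem?_eq_none_iff.mpr (by rw [czFlip_length]; omega)]

theorem czMain1 (state : List Int) (nn sh : Nat) (hsh : sh < nn)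
    (hlen : 2^nn ≤ state.length) :
    czFold (fun j => (j >>> sh) &&& 1 = 1 ∧ (j >>> sh) &&& 1 = 1) (2^nn) state
      = czFlip (strideL1 nn sh) state := by
  have hnd : (strideL1 nn sh).Nodup :=
    (sorted_strideL1 nn sh hsh).imp (fun h => ne_of_lt h)
  have hb : ∀ x ∈ strideL1 nn sh, 0 ≤ x ∧ x.toNat < state.length := by
    intro x hx
    obtain ⟨h0, hlt⟩ := bounds_strideL1 nn sh hsh x hx
    have hc : ((2^nn : Nat) : Int) = 2^nn := by push_cast; ring
    refine ⟨h0, ?_⟩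
    rw [← hc] at hlt
    omega
  apply List.ext_getElem?
  intro i
  by_cases hi : i < state.length
  · rw [czFold_get? _ _ _ (by omega) i hi, czFlip_get? _ _ hb hnd i hi]
    congr 1
    refine if_congr ?_ rfl rfl
    rw [mem_strideL1 nn sh hsh i]
    simp only [shift_and_eq]
    tauto
  · rw [List.getElem?_eq_none_iff.mpr (by rw [czFold_length]; omega),
      List.getElem?_eq_none_iff.mpr (by rw [czFlip_length]; omega)]

-- ===== VERDICT (by name: the statement is the Claim_ definition above) =====
theorem apply_cz_spec : Claim_equal_apply_cz := by
  intro state N ctrl targ _ hpre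
  obtain ⟨hN, hc, ht, hrest⟩ := hpre
  unfold Spec_apply_cz
  change czFold (fun idx => (idx >>> (N - 1 - ctrl).toNat) &&& 1 = 1 ∧
    (idx >>> (N - 1 - targ).toNat) &&& 1 = 1) (2 ^ N.toNat) state = _
  by_cases hneg : ctrl < 0 ∨ targ < 0
  · -- a negative qubit index: nothing flips on either side
    have hminlt : min ctrl targ < 0 := by
      rcases hneg with h | h
      · exact lt_of_le_of_lt (min_le_left ctrl targ) h
      · exact lt_of_le_of_lt (min_le_right ctrl targ) h
    have hsh' : N.toNat ≤ (N - 1 - min ctrl targ).toNat := by omega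
    have hA : czFold (fun idx => (idx >>> (N - 1 - ctrl).toNat) &&& 1 = 1 ∧
        (idx >>> (N - 1 - targ).toNat) &&& 1 = 1) (2 ^ N.toNat) state = state := by
      apply czFold_id
      intro i hi
      rintro ⟨h1, h2⟩
      rcases hneg with h | h
      · rw [shiftHigh_zero i N.toNat _ hi (by omega)] at h1
        simp at h1
      · rw [shiftHigh_zero i N.toNat _ hi (by omega)] at h2
        simp at h2
    rw [hA]
    simp only [apply_cz_alt]
    rw [pyRange_pow_nil _ _ hsh']
    by_cases h : ctrl = targ
    · rw [if_pos h]
      rfl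
    · rw [if_neg h]
      rfl
  · have hc0 : 0 ≤ ctrl := by omega
    have ht0 : 0 ≤ targ := by omega
    have hlen : 2 ^ N.toNat ≤ state.length := by
      rcases hrest with h | h | h
      · omega
      · omega
      · exact h
    by_cases hct : ctrl = targ
    · subst hct
      have hsh : (N - 1 - ctrl).toNat < N.toNat := by omega
      have hB : apply_cz_alt state N ctrl ctrl
          = czFlip (strideL1 N.toNat ((N - 1 - ctrl).toNat)) state := by
        simp only [apply_cz_alt, min_self, max_self, if_true]
        rw [foldl_czFlip_flatMap]
        rfl
      rw [hB]
      exact czMain1 state N.toNat _ hsh hlen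
    · rcases le_total ctrl targ with hle | hle
      · have hmin : min ctrl targ = ctrl := min_eq_left hle
        have hmax : max ctrl targ = targ := max_eq_right hle
        have hsl : (N - 1 - targ).toNat < (N - 1 - ctrl).toNat := by omega
        have hsh : (N - 1 - ctrl).toNat < N.toNat := by omega
        have hB : apply_cz_alt state N ctrl targ
            = czFlip (strideL2 N.toNat ((N - 1 - ctrl).toNat) ((N - 1 - targ).toNat)) state := by
          simp only [apply_cz_alt, if_neg hct, hmin, hmax]
          simp only [foldl_czFlip_flatMap]
          rfl
        rw [hB]
        exact czMain2 state N.toNat _ _ hsl hsh hlen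
      · have hmin : min ctrl targ = targ := min_eq_right hle
        have hmax : max ctrl targ = ctrl := max_eq_left hle
        have hsl : (N - 1 - ctrl).toNat < (N - 1 - targ).toNat := by omega
        have hsh : (N - 1 - targ).toNat < N.toNat := by omega
        have hB : apply_cz_alt state N ctrl targ
            = czFlip (strideL2 N.toNat ((N - 1 - targ).toNat) ((N - 1 - ctrl).toNat)) state := by
          simp only [apply_cz_alt, if_neg hct, hmin, hmax]
          simp only [foldl_czFlip_flatMap]
          rfl
        rw [hB, czFold_congr _ (fun j => (j >>> (N - 1 - targ).toNat) &&& 1 = 1 ∧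
          (j >>> (N - 1 - ctrl).toNat) &&& 1 = 1) (fun i => and_comm) (2 ^ N.toNat) state]
        exact czMain2 state N.toNat _ _ hsl hsh hlen
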